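-- pv_equiv track=rewrite | github.com/eliadvertman/MCP-RAG-Playground | mcp_rag_playground/vectordb/processor/document_processor.py | _find_optimal_boundary
-- ===== SOURCE A (Python) =====
-- def _find_optimal_boundary(text: str, position: int) -> int:
--     """Find the optimal boundary for splitting text."""
--     # Priority order for boundaries
--     boundaries = [
--         ('\n\n', 0),      # Paragraph breaks (highest priority)
--         ('\n', 0),        # Line breaks
--         ('. ', 2),        # Sentence endings
--         ('! ', 2),        # Exclamation endings
--         ('? ', 2),        # Question endings
--         (', ', 1),        # Comma breaks
--         (' ', 0),         # Word boundaries (lowest priority)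
--     ]
--
--     # Search backwards from position for optimal boundary
--     search_range = min(200, position)  # Don't search too far back
--
--     for boundary_text, offset in boundaries:
--         for i in range(position, max(0, position - search_range), -1):
--             if text[i:i+len(boundary_text)] == boundary_text:
--                 return i + len(boundary_text) + offset
--
--     # If no good boundary found, return original position
--     return position
-- ===== SOURCE B (Python) =====
-- def _find_optimal_boundary(text: str, position: int) -> int:
--     """Single backward scan recording, per boundary pattern, the nearest index;
--     then pick by priority order."""
--     boundaries = [
--         ('\n\n', 0),
--         ('\n', 0),
--         ('. ', 2),
--         ('! ', 2),
--         ('? ', 2),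
--         (', ', 1),
--         (' ', 0),
--     ]
--     search_range = min(200, position)
--     lo = max(0, position - search_range)
--     nearest = {}
--     for i in range(position, lo, -1):
--         for bt, _ in boundaries:
--             if bt not in nearest and text[i:i+len(bt)] == bt:
--                 nearest[bt] = i
--     for bt, off in boundaries:
--         if bt in nearest:
--             return nearest[bt] + len(bt) + off
--     return position
-- ===== Notes on version B (the rewrite author's own statement) =====
-- stated objective: alternative
-- what changed: Replaces A's seven full backward scans of the window (one per boundary pattern, in priority order) by a single backward scan that records the nearest matching index per pattern in a dict, then selects the first pattern present in priority order.
import Mathlib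
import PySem

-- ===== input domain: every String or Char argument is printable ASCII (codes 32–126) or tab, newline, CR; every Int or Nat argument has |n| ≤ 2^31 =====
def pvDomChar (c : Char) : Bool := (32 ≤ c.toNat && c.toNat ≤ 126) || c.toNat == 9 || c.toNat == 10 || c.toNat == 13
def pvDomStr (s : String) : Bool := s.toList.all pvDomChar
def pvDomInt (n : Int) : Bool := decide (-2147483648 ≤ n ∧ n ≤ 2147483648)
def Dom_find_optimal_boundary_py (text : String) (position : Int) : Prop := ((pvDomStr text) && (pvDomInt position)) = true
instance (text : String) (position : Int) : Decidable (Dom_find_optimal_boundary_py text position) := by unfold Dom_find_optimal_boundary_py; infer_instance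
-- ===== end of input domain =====

-- B replaces A's seven backward scans (one per boundary pattern) by a single backward
-- scan that records, per pattern, the nearest matching index in a dict, then selects
-- by priority; objective: alternative (one pass over the window instead of seven).

-- shared by both ports: the literal boundary table and the slice-comparison test
def pvBoundaries : List (String × Int) :=
  [("\n\n", 0), ("\n", 0), (". ", 2), ("! ", 2), ("? ", 2), (", ", 1), (" ", 0)]

-- text[i:i+len(bt)] == bt
def pvMtc (text bt : String) (i : Int) : Bool :=
  PySem.Str.slice text (some i) (some (i + PySem.Str.len bt)) == bt

-- ===== PORT A =====
-- inner loop: 'for i in range(...): if text[i:i+len(bt)] == bt: return i+len(bt)+offset'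
def pvAInner (text bt : String) (off : Int) : List Int → Option Int
  | [] => none
  | i :: is =>
    if pvMtc text bt i then some (i + PySem.Str.len bt + off)
    else pvAInner text bt off is

-- outer loop over the boundary table, with early return
def pvAOuter (text : String) (window : List Int) : List (String × Int) → Option Int
  | [] => none
  | (bt, off) :: rest =>
    match pvAInner text bt off window with
    | some r => some r
    | none => pvAOuter text window rest

def find_optimal_boundary_py (text : String) (position : Int) : Int :=
  let search_range := min 200 position
  let window := PySem.List.pyRange position (max 0 (position - search_range)) (-1)
  match pvAOuter text window pvBoundaries with
  | some r => r
  | none => position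

-- ===== PORT B =====
-- one scan step: try every pattern at index i, recording i only for patterns not seen yet
def pvBStep (text : String) (i : Int) (d : PySem.Dict String Int) : PySem.Dict String Int :=
  pvBoundaries.foldl
    (fun d p => if !(d.contains p.1) && pvMtc text p.1 i then d.insert p.1 i else d) d

-- after the scan: first pattern (in priority order) present in the dict wins
def pvBSelect (nearest : PySem.Dict String Int) : List (String × Int) → Option Int
  | [] => none
  | (bt, off) :: rest =>
    match nearest.get? bt with
    | some i => some (i + PySem.Str.len bt + off)
    | none => pvBSelect nearest rest

def find_optimal_boundary_py_alt (text : String) (position : Int) : Int :=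
  let search_range := min 200 position
  let lo := max 0 (position - search_range)
  let nearest := (PySem.List.pyRange position lo (-1)).foldl (fun d i => pvBStep text i d) PySem.Dict.empty
  match pvBSelect nearest pvBoundaries with
  | some r => r
  | none => position

-- ===== PRECONDITION & SPEC =====
def Spec_find_optimal_boundary_py (text : String) (position : Int) (out : Int) : Prop := out = find_optimal_boundary_py_alt text position
instance (text : String) (position : Int) (out : Int) : Decidable (Spec_find_optimal_boundary_py text position out) := by unfold Spec_find_optimal_boundary_py; infer_instance

-- ===== CLAIM (what is proved, stated in full; the proofs are below) =====
def Claim_equal_find_optimal_boundary_py : Prop := ∀ (text : String) (position : Int), Dom_find_optimal_boundary_py text position → Spec_find_optimal_boundary_py text position (find_optimal_boundary_py text position)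

-- ===== LEMMAS AND PROOFS =====

-- A's inner scan is the first match in the window
theorem pvAInner_eq_find? (text bt : String) (off : Int) (ws : List Int) :
    pvAInner text bt off ws
      = (ws.find? (pvMtc text bt)).map (fun i => i + PySem.Str.len bt + off) := by
  induction ws with
  | nil => rfl
  | cons i is ih =>
    by_cases h : pvMtc text bt i = true <;> simp [pvAInner, h, ih]

-- one pvBStep, seen through get?: records i for a pattern iff it is new and matches
theorem pvInnerFold_get (text : String) (i : Int) (L : List (String × Int))
    (d : PySem.Dict String Int) (bt : String) :
    (L.foldl (fun d p => if !(d.contains p.1) && pvMtc text p.1 i then d.insert p.1 i else d) d).get? bt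
      = match d.get? bt with
        | some v => some v
        | none => if bt ∈ L.map Prod.fst ∧ pvMtc text bt i then some i else none := by
  induction L generalizing d with
  | nil => cases h : d.get? bt <;> simp [h]
  | cons p rest ih =>
    obtain ⟨k, o⟩ := p
    rw [List.foldl_cons, ih]
    by_cases hk : k = bt
    · subst hk
      cases hd : d.get? k with
      | some v =>
        have hc : d.contains k = true := by
          cases hcc : d.contains k
          · rw [(PySem.Dict.get?_eq_none_iff_contains d k).mpr hcc] at hd; cases hd
          · rfl
        simp [hc, hd]
      | none =>
        have hc : d.contains k = false := (PySem.Dict.get?_eq_none_iff_contains d k).mp hd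
        by_cases hm : pvMtc text k i = true
        · simp [hc, hm]
        · simp [hc, (Bool.not_eq_true _).mp hm, hd]
    · have hstep : (if !(d.contains k) && pvMtc text k i then d.insert k i else d).get? bt = d.get? bt := by
        split
        · rw [PySem.Dict.get?_insert]; simp [Ne.symm hk]
        · rfl
      rw [hstep]
      cases hd : d.get? bt with
      | some v => rfl
      | none =>
        simp only [List.map_cons]
        have hmem : bt ∈ k :: List.map Prod.fst rest ↔ bt ∈ List.map Prod.fst rest := by
          constructor
          · intro h
            rcases List.mem_cons.mp h with h1 | h1
            · exact absurd h1.symm hk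
            · exact h1
          · exact fun h => List.mem_cons_of_mem _ h
        simp only [hmem]

-- the whole backward scan, seen through get?: the first matching index in the window
theorem pvScan_get (text : String) (ws : List Int) (d : PySem.Dict String Int)
    (bt : String) (hbt : bt ∈ pvBoundaries.map Prod.fst) :
    (ws.foldl (fun d i => pvBStep text i d) d).get? bt
      = match d.get? bt with
        | some v => some v
        | none => ws.find? (pvMtc text bt) := by
  induction ws generalizing d with
  | nil => cases h : d.get? bt <;> simp [h]
  | cons i is ih =>
    rw [List.foldl_cons, ih]
    have hstep : (pvBStep text i d).get? bt
        = match d.get? bt with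
          | some v => some v
          | none => if pvMtc text bt i then some i else none := by
      unfold pvBStep
      rw [pvInnerFold_get]
      cases hd : d.get? bt
      · simp [hbt]
      · rfl
    rw [hstep]
    cases hd : d.get? bt with
    | some v => rfl
    | none =>
      by_cases hm : pvMtc text bt i = true <;> simp [hm]

-- priority selection over the dict equals A's nested loops
theorem pvSelect_eq (text : String) (ws : List Int) (L : List (String × Int))
    (nearest : PySem.Dict String Int)
    (h : ∀ bt ∈ L.map Prod.fst, nearest.get? bt = ws.find? (pvMtc text bt)) :
    pvBSelect nearest L = pvAOuter text ws L := by
  induction L with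
  | nil => rfl
  | cons p rest ih =>
    obtain ⟨bt, off⟩ := p
    have hbt : nearest.get? bt = ws.find? (pvMtc text bt) := h bt (by simp)
    have hrest := ih (fun b hb => h b (by simp [hb]))
    simp only [pvBSelect, pvAOuter, hbt, hrest, pvAInner_eq_find?]
    cases ws.find? (pvMtc text bt) <;> rfl

-- ===== VERDICT (by name: the statement is the Claim_ definition above) =====
theorem find_optimal_boundary_py_spec : Claim_equal_find_optimal_boundary_py := by
  intro text position _
  unfold Spec_find_optimal_boundary_py find_optimal_boundary_py find_optimal_boundary_py_alt
  have hsel := pvSelect_eq text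
    (PySem.List.pyRange position (max 0 (position - min 200 position)) (-1)) pvBoundaries
    ((PySem.List.pyRange position (max 0 (position - min 200 position)) (-1)).foldl
      (fun d i => pvBStep text i d) PySem.Dict.empty)
    (fun bt hbt => by
      rw [pvScan_get text _ PySem.Dict.empty bt hbt]
      simp [PySem.Dict.get?_empty])
  simp only []
  rw [hsel]
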